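-- pv_equiv track=rewrite | github.com/MS-ASE-2020/team-aigame | DatasetPreprocessing.py | FirstPlayers
-- ===== SOURCE A (Python) =====
-- map_Players = {0: 'E', 1: 'S', 2: 'W', 3: 'N', 4: 'E'}
--
-- def FirstPlayers(contract, maker, play_processes):
--     """
--     给定定约，庄家以及打牌过程得到每一轮首出牌的人
--     :param contract: 1C,1D,1H,1S,1NT...
--     :param maker: 1,2,3,4
--     :param play_processes: 希望是list[list] such as: [['cK','cA','c5','c4'],...]
--     :return: [每轮首次出牌的方]
--     """
--     first = [(maker + 1) % 4]  # 首攻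
--     for process in play_processes[:-1]:
--         max_value = process[0]
--         for index, card in enumerate(process[1:]):
--             if 'NT' in contract:
--                 # 无将判断
--                 if max_value[0] != card[0]:
--                     # 不同花色
--                     continue
--                 else:
--                     if '--23456789TJQKA'.index(max_value[1]) < '--23456789TJQKA'.index(card[1]):
--                         max_value = card
--                     else:
--                         continue
--             else:
--                 # 有将
--                 if max_value[0] not in contract:
--                     # 出的牌不是将牌
--                     if max_value[0] != card[0] and card[0] not in contract:
--                         continue
--                     elif max_value[0] != card[0] and card[0] in contract:
--                         max_value = card
--                     elif max_value[0] == card[0]: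
--                         if '--23456789TJQKA'.index(max_value[1]) < '--23456789TJQKA'.index(card[1]):
--                             max_value = card
--                         else:
--                             continue
--                 else:
--                     # 出的牌是将牌
--                     if max_value[0] != card[0]:
--                         continue
--                     else:
--                         if '--23456789TJQKA'.index(max_value[1]) < '--23456789TJQKA'.index(card[1]):
--                             max_value = card
--                         else:
--                             continue
--         max_index = process.index(max_value)
--         first.append((first[-1] + max_index) % 4)
--     return [map_Players[x] for x in first]
-- ===== SOURCE B (Python) =====
-- map_Players = {0: 'E', 1: 'S', 2: 'W', 3: 'N', 4: 'E'}
--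
-- RANKS = '--23456789TJQKA'
--
--
-- def FirstPlayers(contract, maker, play_processes):
--     first = [(maker + 1) % 4]
--     for process in play_processes[:-1]:
--         if 'NT' in contract:
--             win_suit = process[0][0]
--         else:
--             trump = next((c for c in process if c[0] in contract), None)
--             win_suit = trump[0] if trump is not None else process[0][0]
--         winner = max((c for c in process if c[0] == win_suit),
--                      key=lambda c: RANKS.index(c[1]))
--         first.append((first[-1] + process.index(winner)) % 4)
--     return [map_Players[x] for x in first]
-- ===== Notes on version B (the rewrite author's own statement) =====
-- stated objective: simpler
-- what changed: B replaces A's single pairwise fold with nested case analysis by a decomposition per trick: determine the winning suit once (lead suit for NT / no trump, else the suit of the first trump played), then take the first maximum by rank over the cards of that suit; the lowercase-card vs uppercase-contract membership test 'c[0] in contract' is kept exactly as in A.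
-- outside the precondition, e.g. on FirstPlayers('NT', 0, [['ab'], ['x']]): A returns ['S', 'S'], B raises ValueError; on FirstPlayers('NT', 0, [['a'], ['x']]): A returns ['S', 'S'], B raises IndexError
import Mathlib
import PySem

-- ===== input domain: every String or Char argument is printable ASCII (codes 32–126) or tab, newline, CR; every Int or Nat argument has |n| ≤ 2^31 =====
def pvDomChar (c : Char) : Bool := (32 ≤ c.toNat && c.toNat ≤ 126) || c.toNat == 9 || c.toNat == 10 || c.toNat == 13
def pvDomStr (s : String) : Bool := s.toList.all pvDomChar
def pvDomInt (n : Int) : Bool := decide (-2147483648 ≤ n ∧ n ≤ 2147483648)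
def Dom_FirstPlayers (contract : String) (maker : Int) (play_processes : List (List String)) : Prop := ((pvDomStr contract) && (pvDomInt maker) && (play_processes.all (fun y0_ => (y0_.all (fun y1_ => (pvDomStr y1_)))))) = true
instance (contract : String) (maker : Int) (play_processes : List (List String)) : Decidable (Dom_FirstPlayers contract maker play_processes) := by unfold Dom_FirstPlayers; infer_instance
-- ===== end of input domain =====

-- B determines each trick's winning suit once (lead suit for NT / no trump, else the suit of the
-- first trump played) and takes the first maximum by rank over the cards of that suit — simpler
-- than A's pairwise fold with nested case analysis; A's 'c[0] in contract' membership test is kept verbatim.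

-- ===== PORT A =====
-- shared accessors (card[0], '--23456789TJQKA'.index(card[1]), 'NT' in contract, card[0] in contract);
-- the .getD defaults and find's -1 stand for Python's IndexError/ValueError and are unreachable under Pre_.
def pvRanks : List Char := "--23456789TJQKA".toList

def pvSuit (c : String) : Char := (PySem.Str.pyGet? c 0).getD ' '

def pvRankIdx (c : String) : Int := PySem.Chars.find pvRanks [(PySem.Str.pyGet? c 1).getD ' ']

def pvNT (contract : String) : Bool := PySem.Str.isIn "NT" contract

def pvTrump (contract : String) (c : String) : Bool := PySem.Chars.isIn [pvSuit c] contract.toList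

def pvMapPlayers : PySem.Dict Int String := PySem.Dict.ofList [((0 : Int), "E"), (1, "S"), (2, "W"), (3, "N"), (4, "E")]

-- the body of A's inner 'for index, card in enumerate(process[1:])' loop, branch for branch
def pvStepA (contract : String) (max_value card : String) : String :=
  if pvNT contract then
    if pvSuit max_value ≠ pvSuit card then max_value
    else if pvRankIdx max_value < pvRankIdx card then card else max_value
  else
    if ¬ pvTrump contract max_value then
      if pvSuit max_value ≠ pvSuit card ∧ ¬ pvTrump contract card then max_value
      else if pvSuit max_value ≠ pvSuit card ∧ pvTrump contract card then card
      else if pvSuit max_value = pvSuit card then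
        if pvRankIdx max_value < pvRankIdx card then card else max_value
      else max_value
    else
      if pvSuit max_value ≠ pvSuit card then max_value
      else if pvRankIdx max_value < pvRankIdx card then card else max_value

-- A's per-trick 'max_index' (max_value = process[0]; inner loop; process.index(max_value))
def pvTrickIdxA (contract : String) (process : List String) : Int :=
  (((PySem.List.index? process
      ((PySem.List.slice process (some 1) none).foldl (pvStepA contract)
        ((PySem.List.pyGet? process 0).getD ""))).getD 0 : Nat) : Int)

def FirstPlayers (contract : String) (maker : Int) (play_processes : List (List String)) : List String :=
  ((PySem.List.slice play_processes none (some (-1))).foldl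
      (fun first process =>
        first ++ [PySem.Int.mod (PySem.List.pyGetD first (-1) 0 + pvTrickIdxA contract process) 4])
      [PySem.Int.mod (maker + 1) 4]).map
    (fun x => (PySem.Dict.get? pvMapPlayers x).getD "")

-- ===== PORT B =====
-- Python max's step: replace when the new key is strictly greater (first maximum kept)
def pvStepB (best card : String) : String :=
  if pvRankIdx best < pvRankIdx card then card else best

-- win_suit = lead suit for NT, else suit of first trump (next(...)), else lead suit
def pvWinSuit (contract : String) (process : List String) : Char :=
  if pvNT contract then pvSuit ((PySem.List.pyGet? process 0).getD "")
  else
    match process.find? (pvTrump contract) with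
    | some t => pvSuit t
    | none => pvSuit ((PySem.List.pyGet? process 0).getD "")

-- Python max(..., key=rank); "" stands for ValueError on an empty candidate list (unreachable under Pre_)
def pvMaxBy (l : List String) : String :=
  match l with
  | [] => ""
  | h :: t => t.foldl pvStepB h

def pvTrickIdxB (contract : String) (process : List String) : Int :=
  (((PySem.List.index? process
      (pvMaxBy (process.filter (fun c => pvSuit c == pvWinSuit contract process)))).getD 0 : Nat) : Int)

def FirstPlayers_alt (contract : String) (maker : Int) (play_processes : List (List String)) : List String :=
  ((PySem.List.slice play_processes none (some (-1))).foldl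
      (fun first process =>
        first ++ [PySem.Int.mod (PySem.List.pyGetD first (-1) 0 + pvTrickIdxB contract process) 4])
      [PySem.Int.mod (maker + 1) 4]).map
    (fun x => (PySem.Dict.get? pvMapPlayers x).getD "")

-- ===== PRECONDITION & SPEC =====
-- Pre_ restricts to well-formed tricks: every trick before the last is non-empty and each of its cards has a
-- suit char plus a rank char from '--23456789TJQKA'. This excludes the inputs where A raises (IndexError on an
-- empty trick or a short card, ValueError on a rank outside the rank string) and also some malformed tricks A
-- happens to return on because it never compares a rank there (e.g. a one-card trick or all suits distinct) —
-- B evaluates the rank of every winning-suit card and raises on those.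
def Pre_FirstPlayers (contract : String) (maker : Int) (play_processes : List (List String)) : Prop :=
  ∀ process ∈ play_processes.dropLast, process ≠ [] ∧
    ∀ card ∈ process, 2 ≤ card.toList.length ∧ card.toList.getD 1 ' ' ∈ "--23456789TJQKA".toList

instance (contract : String) (maker : Int) (play_processes : List (List String)) : Decidable (Pre_FirstPlayers contract maker play_processes) := by unfold Pre_FirstPlayers; infer_instance

def pvWitness_FirstPlayers : String × Int × List (List String) :=
  ("1H", 1, [["cK", "cA", "c5", "c4"], ["h2"]])

def Spec_FirstPlayers (contract : String) (maker : Int) (play_processes : List (List String)) (out : List String) : Prop := out = FirstPlayers_alt contract maker play_processes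
instance (contract : String) (maker : Int) (play_processes : List (List String)) (out : List String) : Decidable (Spec_FirstPlayers contract maker play_processes out) := by unfold Spec_FirstPlayers; infer_instance

-- ===== CLAIM (what is proved, stated in full; the proofs are below) =====
def Claim_equal_FirstPlayers : Prop := ∀ (contract : String) (maker : Int) (play_processes : List (List String)), Dom_FirstPlayers contract maker play_processes → Pre_FirstPlayers contract maker play_processes → Spec_FirstPlayers contract maker play_processes (FirstPlayers contract maker play_processes)

-- ===== LEMMAS AND PROOFS =====

lemma pvTrump_congr {contract : String} {a b : String} (h : pvSuit a = pvSuit b) :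
    pvTrump contract a = pvTrump contract b := by
  unfold pvTrump; rw [h]

lemma pvSuit_stepB {m c : String} : pvSuit (pvStepB m c) = pvSuit m ∨ pvSuit (pvStepB m c) = pvSuit c := by
  unfold pvStepB; split
  · exact Or.inr rfl
  · exact Or.inl rfl

-- in all three 'simple' regimes (NT, max is trump, no trump anywhere in the rest) A's step is
-- 'compare within the current suit, skip others'
lemma fold_step_filter (contract : String) :
    ∀ (t : List String) (m : String),
      (pvNT contract = true ∨ pvTrump contract m = true ∨
        (pvTrump contract m = false ∧ ∀ c ∈ t, pvTrump contract c = false)) →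
      t.foldl (pvStepA contract) m
        = (t.filter (fun c => pvSuit c == pvSuit m)).foldl pvStepB m := by
  intro t
  induction t with
  | nil => intro m _; rfl
  | cons c t ih =>
    intro m hm
    have hstep : pvStepA contract m c = (if pvSuit c = pvSuit m then pvStepB m c else m) := by
      unfold pvStepA pvStepB
      rcases hm with hnt | htr | ⟨hmf, hall⟩
      · rw [if_pos hnt]
        by_cases h : pvSuit c = pvSuit m
        · simp [h]
        · have hne : pvSuit m ≠ pvSuit c := fun e => h e.symm
          simp [h, hne]
      · by_cases hNT : pvNT contract = true
        · rw [if_pos hNT]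
          by_cases h : pvSuit c = pvSuit m
          · simp [h]
          · have hne : pvSuit m ≠ pvSuit c := fun e => h e.symm
            simp [h, hne]
        · rw [if_neg hNT, if_neg (by simp [htr])]
          by_cases h : pvSuit c = pvSuit m
          · simp [h]
          · have hne : pvSuit m ≠ pvSuit c := fun e => h e.symm
            simp [h, hne]
      · by_cases hNT : pvNT contract = true
        · rw [if_pos hNT]
          by_cases h : pvSuit c = pvSuit m
          · simp [h]
          · have hne : pvSuit m ≠ pvSuit c := fun e => h e.symm
            simp [h, hne]
        · rw [if_neg hNT, if_pos (by simp [hmf])]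
          have hcf : pvTrump contract c = false := hall c (List.mem_cons_self)
          by_cases h : pvSuit c = pvSuit m
          · simp [h]
          · have hne : pvSuit m ≠ pvSuit c := fun e => h e.symm
            simp [h, hne, hcf]
    by_cases h : pvSuit c = pvSuit m
    · -- c is compared; suit of the new max is still pvSuit m
      have hm' : pvSuit (pvStepB m c) = pvSuit m := by
        rcases pvSuit_stepB (m := m) (c := c) with h1 | h1
        · exact h1
        · rw [h1, h]
      have hnext : pvNT contract = true ∨ pvTrump contract (pvStepB m c) = true ∨
          (pvTrump contract (pvStepB m c) = false ∧ ∀ x ∈ t, pvTrump contract x = false) := by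
        rcases hm with hnt | htr | ⟨hmf, hall⟩
        · exact Or.inl hnt
        · exact Or.inr (Or.inl ((pvTrump_congr hm').trans htr))
        · exact Or.inr (Or.inr ⟨(pvTrump_congr hm').trans hmf,
            fun x hx => hall x (List.mem_cons_of_mem _ hx)⟩)
      calc (c :: t).foldl (pvStepA contract) m
          = t.foldl (pvStepA contract) (pvStepB m c) := by
            simp [List.foldl_cons, hstep, h]
        _ = (t.filter (fun x => pvSuit x == pvSuit (pvStepB m c))).foldl pvStepB (pvStepB m c) :=
            ih (pvStepB m c) hnext
        _ = ((c :: t).filter (fun x => pvSuit x == pvSuit m)).foldl pvStepB m := by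
            simp [hm', h]
    · have hnext : pvNT contract = true ∨ pvTrump contract m = true ∨
          (pvTrump contract m = false ∧ ∀ x ∈ t, pvTrump contract x = false) := by
        rcases hm with hnt | htr | ⟨hmf, hall⟩
        · exact Or.inl hnt
        · exact Or.inr (Or.inl htr)
        · exact Or.inr (Or.inr ⟨hmf, fun x hx => hall x (List.mem_cons_of_mem _ hx)⟩)
      calc (c :: t).foldl (pvStepA contract) m
          = t.foldl (pvStepA contract) m := by simp [List.foldl_cons, hstep, h]
        _ = (t.filter (fun x => pvSuit x == pvSuit m)).foldl pvStepB m := ih m hnext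
        _ = ((c :: t).filter (fun x => pvSuit x == pvSuit m)).foldl pvStepB m := by
            simp [h]

-- while no trump has been played the running max keeps the lead suit (and stays a non-trump)
lemma fold_nontrump_inv (contract : String) (hNT : pvNT contract = false) :
    ∀ (as : List String) (m : String), pvTrump contract m = false →
      (∀ c ∈ as, pvTrump contract c = false) →
      pvSuit (as.foldl (pvStepA contract) m) = pvSuit m ∧
        pvTrump contract (as.foldl (pvStepA contract) m) = false := by
  intro as
  induction as with
  | nil => intro m hmf _; exact ⟨rfl, hmf⟩
  | cons c t ih =>
    intro m hmf hall
    have hcf : pvTrump contract c = false := hall c (List.mem_cons_self)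
    have hstep : pvStepA contract m c = (if pvSuit c = pvSuit m then pvStepB m c else m) := by
      unfold pvStepA pvStepB
      rw [if_neg (by simp [hNT]), if_pos (by simp [hmf])]
      by_cases h : pvSuit c = pvSuit m
      · simp [h]
      · have hne : pvSuit m ≠ pvSuit c := fun e => h e.symm
        simp [h, hne, hcf]
    by_cases h : pvSuit c = pvSuit m
    · have hm' : pvSuit (pvStepB m c) = pvSuit m := by
        rcases pvSuit_stepB (m := m) (c := c) with h1 | h1
        · exact h1
        · rw [h1, h]
      have := ih (pvStepB m c) ((pvTrump_congr hm').trans hmf)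
        (fun x hx => hall x (List.mem_cons_of_mem _ hx))
      simp only [List.foldl_cons, hstep, if_pos h]
      exact ⟨this.1.trans hm', this.2⟩
    · simp only [List.foldl_cons, hstep, if_neg h]
      exact ih m hmf (fun x hx => hall x (List.mem_cons_of_mem _ hx))

lemma filter_nontrump_nil (contract : String) (u : String) (hu : pvTrump contract u = true) :
    ∀ (as : List String), (∀ c ∈ as, pvTrump contract c = false) →
      as.filter (fun c => pvSuit c == pvSuit u) = [] := by
  intro as hall
  rw [List.filter_eq_nil_iff]
  intro c hc
  simp only [beq_iff_eq]
  intro h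
  have := (pvTrump_congr (contract := contract) h).trans hu
  rw [hall c hc] at this
  simp at this

-- the heart of the equivalence: A's pairwise fold computes B's winner on every trick
lemma trick_eq (contract : String) (process : List String) :
    (PySem.List.slice process (some 1) none).foldl (pvStepA contract)
        ((PySem.List.pyGet? process 0).getD "")
      = pvMaxBy (process.filter (fun c => pvSuit c == pvWinSuit contract process)) := by
  cases process with
  | nil => rfl
  | cons h t =>
    rw [PySem.List.slice_from_one]
    simp only [List.tail_cons, PySem.List.pyGet?_zero_cons, Option.getD_some]
    by_cases hNT : pvNT contract = true
    · have hws : pvWinSuit contract (h :: t) = pvSuit h := by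
        unfold pvWinSuit
        rw [if_pos hNT]
        simp
      rw [hws]
      have hfh : (h :: t).filter (fun c => pvSuit c == pvSuit h)
          = h :: t.filter (fun c => pvSuit c == pvSuit h) := by simp
      rw [hfh]
      exact fold_step_filter contract t h (Or.inl hNT)
    · have hNT' : pvNT contract = false := by
        cases hx : pvNT contract
        · rfl
        · exact absurd hx hNT
      cases hfind : (h :: t).find? (pvTrump contract) with
      | none =>
        have hall : ∀ c ∈ h :: t, pvTrump contract c = false := by
          intro c hc
          simpa using List.find?_eq_none.mp hfind c hc
        have hws : pvWinSuit contract (h :: t) = pvSuit h := by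
          unfold pvWinSuit
          rw [if_neg hNT, hfind]
          simp
        rw [hws]
        have hfh : (h :: t).filter (fun c => pvSuit c == pvSuit h)
            = h :: t.filter (fun c => pvSuit c == pvSuit h) := by simp
        rw [hfh]
        exact fold_step_filter contract t h
          (Or.inr (Or.inr ⟨hall h (List.mem_cons_self),
            fun c hc => hall c (List.mem_cons_of_mem _ hc)⟩))
      | some u =>
        have hws : pvWinSuit contract (h :: t) = pvSuit u := by
          unfold pvWinSuit
          rw [if_neg hNT, hfind]
        rw [hws]
        obtain ⟨hu, as, bs, heq, hpre⟩ := List.find?_eq_some_iff_append.mp hfind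
        have hpre' : ∀ a ∈ as, pvTrump contract a = false := by
          intro a ha
          simpa using hpre a ha
        cases as with
        | nil =>
          -- the lead card itself is the first trump
          have hhu : h = u := by simpa using congrArg (fun l => l.head?) heq
          subst hhu
          have ht : t = bs := by simpa using congrArg (fun l => l.tail) heq
          subst ht
          have hfh : (h :: t).filter (fun c => pvSuit c == pvSuit h)
              = h :: t.filter (fun c => pvSuit c == pvSuit h) := by simp
          rw [hfh]
          exact fold_step_filter contract t h (Or.inr (Or.inl hu))
        | cons a as' =>
          have hha : h = a := by simpa using congrArg (fun l => l.head?) heq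
          subst hha
          have ht : t = as' ++ u :: bs := by simpa using congrArg (fun l => l.tail) heq
          subst ht
          have hhf : pvTrump contract h = false := hpre' h (List.mem_cons_self)
          have has' : ∀ c ∈ as', pvTrump contract c = false :=
            fun c hc => hpre' c (List.mem_cons_of_mem _ hc)
          -- left side: fold across the trump-free prefix, then the first trump takes over
          obtain ⟨hsm, htm⟩ := fold_nontrump_inv contract hNT' as' h hhf has'
          set m1 := as'.foldl (pvStepA contract) h with hm1
          have hsu : pvSuit m1 ≠ pvSuit u := by
            intro hx
            have := (pvTrump_congr (contract := contract) hx).symm.trans htm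
            rw [hu] at this
            simp at this
          have hstepu : pvStepA contract m1 u = u := by
            unfold pvStepA
            rw [if_neg hNT, if_pos (by simp [htm]), if_neg (by simp [hsu, hu]),
              if_pos ⟨hsu, by simp [hu]⟩]
          have hL : (as' ++ u :: bs).foldl (pvStepA contract) h
              = bs.foldl (pvStepA contract) u := by
            rw [List.foldl_append, List.foldl_cons, ← hm1, hstepu]
          -- right side: only the trump suit survives the filter
          have hfil : (h :: (as' ++ u :: bs)).filter (fun c => pvSuit c == pvSuit u)
              = u :: bs.filter (fun c => pvSuit c == pvSuit u) := by
            have h1 : (pvSuit h == pvSuit u) = false := by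
              simp only [beq_eq_false_iff_ne, ne_eq]
              rw [hsm] at hsu
              exact hsu
            simp only [List.filter_cons, h1, List.filter_append,
              filter_nontrump_nil contract u hu as' has']
            simp
          rw [hL, hfil]
          exact fold_step_filter contract bs u (Or.inr (Or.inl hu))

lemma trickIdx_eq (contract : String) : pvTrickIdxA contract = pvTrickIdxB contract := by
  funext process
  unfold pvTrickIdxA pvTrickIdxB
  rw [trick_eq]

-- ===== VERDICT (by name: the statement is the Claim_ definition above) =====
theorem FirstPlayers_spec : Claim_equal_FirstPlayers := by
  intro contract maker play_processes _ _
  unfold Spec_FirstPlayers FirstPlayers FirstPlayers_alt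
  rw [trickIdx_eq]
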